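-- pv_equiv track=rewrite | github.com/ashgithub/AIAppilcationStacks | app/server/streaming_app/ui_builders/ui_parallel_widget_worker_agent.py | _humanize_key
-- ===== SOURCE A (Python) =====
-- def _humanize_key(data_key: str) -> str:
--     tokens = []
--     current = []
--     for ch in data_key:
--         if ch in "_-":
--             if current:
--                 tokens.append("".join(current))
--                 current = []
--         elif ch.isupper() and current:
--             tokens.append("".join(current))
--             current = [ch.lower()]
--         else:
--             current.append(ch)
--     if current:
--         tokens.append("".join(current))
--     return " ".join(token.capitalize() for token in tokens if token) or data_key
-- ===== SOURCE B (Python) =====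
-- def _humanize_key(data_key: str) -> str:
--     # One linear pass building a marked string, then one split/filter/capitalize pass.
--     buf = []
--     for ch in data_key:
--         if ch in "_-":
--             buf.append("\x00")
--         elif ch.isupper():
--             buf.append("\x00" + ch.lower())
--         else:
--             buf.append(ch)
--     pieces = "".join(buf).split("\x00")
--     return " ".join(p.capitalize() for p in pieces if p) or data_key
-- ===== Notes on version B (the rewrite author's own statement) =====
-- stated objective: simpler
-- what changed: A's two-level state machine (token list + current-word buffer with flush logic) is replaced by a single marker-insertion pass producing one string, followed by split on the marker, filter of empty pieces, and capitalize/join.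
import Mathlib
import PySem

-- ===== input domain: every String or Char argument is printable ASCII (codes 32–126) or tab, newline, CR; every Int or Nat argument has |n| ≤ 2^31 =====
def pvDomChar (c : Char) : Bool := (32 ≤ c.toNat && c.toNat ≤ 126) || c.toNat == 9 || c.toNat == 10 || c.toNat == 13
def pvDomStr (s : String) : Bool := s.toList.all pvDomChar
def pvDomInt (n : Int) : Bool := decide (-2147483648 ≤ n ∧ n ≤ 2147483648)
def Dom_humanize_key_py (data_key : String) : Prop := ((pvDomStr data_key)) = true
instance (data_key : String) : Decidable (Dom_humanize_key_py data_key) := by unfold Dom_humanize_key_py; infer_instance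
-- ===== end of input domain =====

-- B replaces A's token-buffer state machine by a marker-string pass followed by split/filter/capitalize (objective: simpler decomposition, same cost).

-- Python str.capitalize() on the ASCII domain: first char uppercased, rest lowercased.
def pvCap (t : List Char) : List Char :=
  match t with
  | [] => []
  | c :: cs => PySem.Chars.upperChar c :: cs.map PySem.Chars.lowerChar

-- ===== PORT A =====
def humAStep (st : List (List Char) × List Char) (ch : Char) : List (List Char) × List Char :=
  if ch = '_' ∨ ch = '-' then
    if st.2 ≠ [] then (st.1 ++ [st.2], []) else st
  else if PySem.Chars.isupper ch ∧ st.2 ≠ [] then (st.1 ++ [st.2], [PySem.Chars.lowerChar ch])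
  else (st.1, st.2 ++ [ch])

def humanize_key_py (data_key : String) : String :=
  let st := data_key.toList.foldl humAStep ([], [])
  let toks := if st.2 ≠ [] then st.1 ++ [st.2] else st.1
  let joined := List.intercalate [' '] ((toks.filter (· ≠ [])).map pvCap)
  if joined = [] then data_key else String.ofList joined

-- ===== PORT B =====
def pvMark : Char := Char.ofNat 0

def humBPiece (ch : Char) : List Char :=
  if ch = '_' ∨ ch = '-' then [pvMark]
  else if PySem.Chars.isupper ch then [pvMark, PySem.Chars.lowerChar ch]
  else [ch]

-- hand port of str.split('\x00') (single-character separator): exact on all char lists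
def pvSplitMark : List Char → List (List Char)
  | [] => [[]]
  | c :: cs =>
    match pvSplitMark cs with
    | [] => [[]]
    | t :: ts => if c = pvMark then [] :: t :: ts else (c :: t) :: ts

def humanize_key_py_alt (data_key : String) : String :=
  let buf := data_key.toList.foldl (fun acc ch => acc ++ humBPiece ch) []
  let toks := (pvSplitMark buf).filter (· ≠ [])
  let joined := List.intercalate [' '] (toks.map pvCap)
  if joined = [] then data_key else String.ofList joined

-- ===== PRECONDITION & SPEC =====
def Spec_humanize_key_py (data_key : String) (out : String) : Prop := out = humanize_key_py_alt data_key
instance (data_key : String) (out : String) : Decidable (Spec_humanize_key_py data_key out) := by unfold Spec_humanize_key_py; infer_instance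

-- ===== CLAIM (what is proved, stated in full; the proofs are below) =====
def Claim_equal_humanize_key_py : Prop := ∀ (data_key : String), Dom_humanize_key_py data_key → Spec_humanize_key_py data_key (humanize_key_py data_key)

-- ===== LEMMAS AND PROOFS =====

-- reference tokenizer: the token list A's state machine produces from state (cur) on input l
def pvR (cur : List Char) : List Char → List (List Char)
  | [] => if cur = [] then [] else [cur]
  | ch :: l =>
    if ch = '_' ∨ ch = '-' then
      (if cur = [] then pvR [] l else cur :: pvR [] l)
    else if PySem.Chars.isupper ch ∧ cur ≠ [] then cur :: pvR [PySem.Chars.lowerChar ch] l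
    else pvR (cur ++ [ch]) l

lemma foldA_char (l : List Char) : ∀ (toks : List (List Char)) (cur : List Char),
    (let st := l.foldl humAStep (toks, cur);
     if st.2 ≠ [] then st.1 ++ [st.2] else st.1) = toks ++ pvR cur l := by
  induction l with
  | nil => intro toks cur; by_cases h : cur = [] <;> simp [pvR, h]
  | cons ch l ih =>
    intro toks cur
    simp only [List.foldl_cons, pvR, humAStep]
    by_cases hsep : ch = '_' ∨ ch = '-'
    · by_cases hc : cur = [] <;>
        simp [hsep, hc, ih, List.append_assoc]
    · by_cases hu : PySem.Chars.isupper ch ∧ cur ≠ []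
      · simp [hsep, hu, ih, List.append_assoc]
      · simp [hsep, hu, ih]

lemma pvR_ne_nil (l : List Char) : ∀ cur, [] ∉ pvR cur l := by
  induction l with
  | nil => intro cur; by_cases h : cur = [] <;> simp [pvR, h]
  | cons ch l ih =>
    intro cur
    simp only [pvR]
    by_cases hsep : ch = '_' ∨ ch = '-'
    · by_cases hc : cur = []
      · simp [hsep, hc, ih]
      · simp [hsep, hc, ih, Ne.symm hc]
    · by_cases hu : PySem.Chars.isupper ch ∧ cur ≠ []
      · simp [hsep, hu, ih, Ne.symm hu.2]
      · simp [hsep, hu, ih]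

lemma split_nomark (xs : List Char) (h : pvMark ∉ xs) : pvSplitMark xs = [xs] := by
  induction xs with
  | nil => rfl
  | cons c cs ih =>
    simp only [List.mem_cons, not_or] at h
    simp [pvSplitMark, ih h.2, Ne.symm h.1]

lemma split_ne_nil (xs : List Char) : pvSplitMark xs ≠ [] := by
  cases xs with
  | nil => simp [pvSplitMark]
  | cons c cs =>
    simp only [pvSplitMark]
    rcases hsp : pvSplitMark cs with _ | ⟨t, ts⟩ <;> simp_all <;> split <;> simp

lemma split_mark (xs : List Char) (rest : List Char) (h : pvMark ∉ xs) :
    pvSplitMark (xs ++ pvMark :: rest) = xs :: pvSplitMark rest := by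
  induction xs with
  | nil =>
    simp only [List.nil_append, pvSplitMark]
    rcases hsp : pvSplitMark rest with _ | ⟨t, ts⟩
    · exact absurd hsp (split_ne_nil rest)
    · simp
  | cons c cs ih =>
    simp only [List.mem_cons, not_or] at h
    simp only [List.cons_append, pvSplitMark, ih h.2]
    simp [Ne.symm h.1]

lemma char_le_iff {a b : Char} : a ≤ b ↔ a.toNat ≤ b.toNat := Iff.rfl

lemma upper_toNat {c : Char} (h : PySem.Chars.isupper c = true) :
    65 ≤ c.toNat ∧ c.toNat ≤ 90 := by
  simp [PySem.Chars.isupper, char_le_iff] at h; exact h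

lemma lowerChar_upper_toNat {c : Char} (h : PySem.Chars.isupper c = true) :
    (PySem.Chars.lowerChar c).toNat = c.toNat + 32 := by
  obtain ⟨h1, h2⟩ := upper_toNat h
  simp only [PySem.Chars.lowerChar, h, if_true]
  rw [Char.toNat_ofNat, if_pos]; unfold Nat.isValidChar; omega

lemma lowerChar_ne_mark {c : Char} (h : PySem.Chars.isupper c = true) :
    PySem.Chars.lowerChar c ≠ pvMark := by
  intro heq
  have := congrArg Char.toNat heq
  rw [lowerChar_upper_toNat h] at this
  have h2 : pvMark.toNat = 0 := by decide
  have := upper_toNat h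
  omega

lemma upperChar_lowerChar {c : Char} (h : PySem.Chars.isupper c = true) :
    PySem.Chars.upperChar (PySem.Chars.lowerChar c) = PySem.Chars.upperChar c := by
  obtain ⟨h1, h2⟩ := upper_toNat h
  have hl := lowerChar_upper_toNat h
  have hlow : PySem.Chars.islower (PySem.Chars.lowerChar c) = true := by
    simp [PySem.Chars.islower, char_le_iff, hl]; omega
  have hnot : PySem.Chars.islower c = false := by
    simp [PySem.Chars.islower, char_le_iff]; omega
  simp only [PySem.Chars.upperChar, hlow, hnot, if_true, hl]
  simp only [Nat.add_sub_cancel, Char.ofNat_toNat, if_neg Bool.false_ne_true]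

lemma pvCap_append (x : Char) (xs : List Char) (ch : Char) :
    pvCap ((x :: xs) ++ [ch]) = pvCap (x :: xs) ++ [PySem.Chars.lowerChar ch] := by
  simp [pvCap]

lemma dom_ne_mark {c : Char} (h : pvDomChar c = true) : c ≠ pvMark := by
  intro heq; rw [heq] at h; exact absurd h (by decide)

lemma pvCap_append2 (xs ys : List Char) (hx : xs ≠ []) (hy : ys ≠ []) (h : pvCap xs = pvCap ys) (ch : Char) :
    pvCap (xs ++ [ch]) = pvCap (ys ++ [ch]) := by
  cases xs with
  | nil => exact absurd rfl hx
  | cons a as => cases ys with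
    | nil => exact absurd rfl hy
    | cons b bs => rw [pvCap_append, pvCap_append, h]

lemma foldB_char (l : List Char) : ∀ (cur cur' : List Char), pvMark ∉ cur' →
    (∀ c ∈ l, pvDomChar c = true) → pvCap cur' = pvCap cur → (cur' = [] ↔ cur = []) →
    ((pvSplitMark (cur' ++ l.flatMap humBPiece)).filter (· ≠ [])).map pvCap
      = (pvR cur l).map pvCap := by
  induction l with
  | nil =>
    intro cur cur' hm _ hcap hiff
    simp only [List.flatMap_nil, List.append_nil, split_nomark cur' hm, pvR]
    by_cases hc : cur' = []
    · simp [hc, hiff.mp hc]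
    · have : ¬ cur = [] := fun h => hc (hiff.mpr h)
      simp [hc, this, hcap]
  | cons ch l ih =>
    intro cur cur' hm hd hcap hiff
    have hch : pvDomChar ch = true := hd ch (List.mem_cons_self ..)
    have hl : ∀ c ∈ l, pvDomChar c = true := fun c hc => hd c (List.mem_cons_of_mem _ hc)
    simp only [List.flatMap_cons, pvR]
    by_cases hsep : ch = '_' ∨ ch = '-'
    · have hp : humBPiece ch = [pvMark] := if_pos hsep
      rw [hp, if_pos hsep]
      have hsplit : pvSplitMark (cur' ++ ([pvMark] ++ l.flatMap humBPiece))
          = cur' :: pvSplitMark (l.flatMap humBPiece) := by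
        simpa using split_mark cur' (l.flatMap humBPiece) hm
      rw [hsplit]
      have ihe := ih [] [] (by simp) hl rfl Iff.rfl
      simp only [List.nil_append] at ihe
      by_cases hc : cur' = []
      · rw [if_pos (hiff.mp hc), List.filter_cons_of_neg (by simp [hc])]
        exact ihe
      · have hcne : ¬ cur = [] := fun h => hc (hiff.mpr h)
        rw [if_neg hcne, List.filter_cons_of_pos (by simpa using hc)]
        simp only [List.map_cons, hcap, ihe]
    · rw [if_neg hsep]
      by_cases hu : PySem.Chars.isupper ch = true
      · have hp : humBPiece ch = [pvMark, PySem.Chars.lowerChar ch] := by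
          rw [humBPiece, if_neg hsep, if_pos hu]
        rw [hp]
        have hsplit : pvSplitMark (cur' ++ ([pvMark, PySem.Chars.lowerChar ch] ++ l.flatMap humBPiece))
            = cur' :: pvSplitMark ([PySem.Chars.lowerChar ch] ++ l.flatMap humBPiece) := by
          simpa using split_mark cur' (PySem.Chars.lowerChar ch :: l.flatMap humBPiece) hm
        rw [hsplit]
        by_cases hc : cur = []
        · have hc' : cur' = [] := hiff.mpr hc
          rw [if_neg (by simp [hc]), hc, List.nil_append,
            List.filter_cons_of_neg (by simp [hc'])]
          exact ih [ch] [PySem.Chars.lowerChar ch]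
            (by simpa using (Ne.symm (lowerChar_ne_mark hu))) hl
            (by simp [pvCap, upperChar_lowerChar hu]) (by simp)
        · rw [if_pos ⟨hu, hc⟩]
          have hc' : cur' ≠ [] := fun h => hc (hiff.mp h)
          rw [List.filter_cons_of_pos (by simpa using hc')]
          have ihe := ih [PySem.Chars.lowerChar ch] [PySem.Chars.lowerChar ch]
            (by simpa using (Ne.symm (lowerChar_ne_mark hu))) hl rfl Iff.rfl
          simp only [List.map_cons, hcap, ihe]
      · have hp : humBPiece ch = [ch] := by
          rw [humBPiece, if_neg hsep, if_neg (by simp [hu])]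
        rw [hp, if_neg (by simp [hu])]
        have hchm : ch ≠ pvMark := dom_ne_mark hch
        have ihe := ih (cur ++ [ch]) (cur' ++ [ch])
          (by simp [hm, Ne.symm hchm])
          hl
          (by
            by_cases hc : cur' = []
            · rw [hc, hiff.mp hc]
            · exact pvCap_append2 _ _ hc (fun h => hc (hiff.mpr h)) hcap ch)
          (by simp)
        simpa [List.append_assoc] using ihe

-- ===== VERDICT (by name: the statement is the Claim_ definition above) =====
lemma foldl_flat (l : List Char) : ∀ acc : List Char,
    l.foldl (fun a c => a ++ humBPiece c) acc = acc ++ l.flatMap humBPiece := by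
  induction l with
  | nil => simp
  | cons c l ih => intro acc; simp [ih, List.append_assoc]

theorem humanize_key_py_spec : Claim_equal_humanize_key_py := by
  intro data_key hdom
  unfold Spec_humanize_key_py
  have hd : ∀ c ∈ data_key.toList, pvDomChar c = true := by
    unfold Dom_humanize_key_py pvDomStr at hdom
    simpa [List.all_eq_true] using hdom
  have hA := foldA_char data_key.toList [] []
  simp only [List.nil_append] at hA
  have hB := foldB_char data_key.toList [] [] (by simp) hd rfl Iff.rfl
  simp only [List.nil_append] at hB
  have hfil : (pvR [] data_key.toList).filter (· ≠ []) = pvR [] data_key.toList :=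
    List.filter_eq_self.mpr (fun a ha => by
      simpa using fun h => pvR_ne_nil _ _ (h ▸ ha))
  simp only [humanize_key_py, humanize_key_py_alt, foldl_flat, List.nil_append, hA, hfil, hB]
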